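-- pv_equiv track=rewrite | github.com/TIDE-project/TIM | timApp/modules/svn/svn3.py | take_last_number
-- ===== SOURCE A (Python) =====
-- def take_last_number(s, i):
--     n = 0
--     k = 1
--     c = '0'
--     while i >= 0:  # pass non numbers
--         c = s[i]
--         if '0' <= c <= '9':
--             break
--         i -= 1
--     while i >= 0:
--         n += int(c) * k
--         k *= 10
--         i -= 1
--         if i < 0:
--             break
--         c = s[i]
--         if c < '0' or '9' < c:
--             break
--
--     return n, i
-- ===== SOURCE B (Python) =====
-- def take_last_number(s, i):
--     # find rightmost digit at or before position i
--     while i >= 0 and not ('0' <= s[i] <= '9'):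
--         i -= 1
--     if i < 0:
--         return 0, i
--     end = i
--     # scan past the digit run
--     while i >= 0 and '0' <= s[i] <= '9':
--         i -= 1
--     # Horner evaluation of the digit run, left to right
--     n = 0
--     for c in s[i + 1:end + 1]:
--         n = 10 * n + (ord(c) - 48)
--     return n, i
-- ===== Notes on version B (the rewrite author's own statement) =====
-- stated objective: simpler
-- what changed: A interleaves digit detection with a right-to-left accumulation keeping a running power-of-ten multiplier k; B first finds the two boundaries of the digit run with plain index scans and then evaluates the run once with a left-to-right Horner pass over the slice, no multiplier state.
import Mathlib
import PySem

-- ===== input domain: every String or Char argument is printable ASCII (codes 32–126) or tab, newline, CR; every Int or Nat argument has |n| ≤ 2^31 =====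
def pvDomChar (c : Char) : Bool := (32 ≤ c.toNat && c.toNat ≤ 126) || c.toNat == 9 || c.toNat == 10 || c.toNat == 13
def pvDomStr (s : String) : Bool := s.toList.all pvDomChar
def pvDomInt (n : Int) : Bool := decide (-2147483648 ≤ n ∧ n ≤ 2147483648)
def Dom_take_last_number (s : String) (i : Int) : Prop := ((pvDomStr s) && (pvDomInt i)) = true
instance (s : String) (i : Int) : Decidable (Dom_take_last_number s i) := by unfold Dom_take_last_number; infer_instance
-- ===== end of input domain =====

-- B replaces A's interleaved right-to-left n/k accumulation by boundary-finding scans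
-- plus one left-to-right Horner pass over the digit run (objective: simpler).

-- ===== PORT A =====
-- first while loop: pass non numbers (c threaded as in Python; '0' default is unreachable under Pre_)
def tlnLoop1 (cs : List Char) (c : Char) (i : Int) : Char × Int :=
  if h : 0 ≤ i then
    let c' := PySem.List.pyGetD cs i '0'
    if '0' ≤ c' ∧ c' ≤ '9' then (c', i)
    else tlnLoop1 cs c' (i - 1)
  else (c, i)
termination_by (i + 1).toNat
decreasing_by omega

-- second while loop: accumulate digits right-to-left with multiplier k
def tlnLoop2 (cs : List Char) (c : Char) (n k i : Int) : Int × Int :=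
  if h : 0 ≤ i then
    let n' := n + (PySem.Int.ofChars? [c]).getD 0 * k
    let k' := k * 10
    let i' := i - 1
    if i' < 0 then (n', i')
    else
      let c' := PySem.List.pyGetD cs i' '0'
      if c' < '0' ∨ '9' < c' then (n', i')
      else tlnLoop2 cs c' n' k' i'
  else (n, i)
termination_by (i + 1).toNat
decreasing_by omega

def take_last_number (s : String) (i : Int) : Int × Int :=
  let cs := s.toList
  let r := tlnLoop1 cs '0' i
  tlnLoop2 cs r.1 0 1 r.2

-- ===== PORT B =====
-- scan backward to the rightmost digit at or before i
def tlnSkipNonDigits (cs : List Char) (i : Int) : Int :=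
  if h : 0 ≤ i then
    if '0' ≤ PySem.List.pyGetD cs i '0' ∧ PySem.List.pyGetD cs i '0' ≤ '9' then i
    else tlnSkipNonDigits cs (i - 1)
  else i
termination_by (i + 1).toNat
decreasing_by omega

-- scan backward past the digit run
def tlnSkipDigits (cs : List Char) (i : Int) : Int :=
  if h : 0 ≤ i then
    if '0' ≤ PySem.List.pyGetD cs i '0' ∧ PySem.List.pyGetD cs i '0' ≤ '9' then
      tlnSkipDigits cs (i - 1)
    else i
  else i
termination_by (i + 1).toNat
decreasing_by omega

def take_last_number_alt (s : String) (i : Int) : Int × Int :=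
  let cs := s.toList
  let i1 := tlnSkipNonDigits cs i
  if i1 < 0 then (0, i1)
  else
    let e := i1
    let i2 := tlnSkipDigits cs i1
    let n := (PySem.List.slice cs (some (i2 + 1)) (some (e + 1))).foldl
      (fun n c => 10 * n + ((c.toNat : Int) - 48)) 0
    (n, i2)

-- ===== PRECONDITION & SPEC =====
-- A raises IndexError at s[i] when len(s) ≤ i; those inputs are excluded.
def Pre_take_last_number (s : String) (i : Int) : Prop := i < (s.toList.length : Int)
instance (s : String) (i : Int) : Decidable (Pre_take_last_number s i) := by
  unfold Pre_take_last_number; infer_instance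

def pvWitness_take_last_number : String × Int := ("ab12", 3)

def Spec_take_last_number (s : String) (i : Int) (out : Int × Int) : Prop := out = take_last_number_alt s i
instance (s : String) (i : Int) (out : Int × Int) : Decidable (Spec_take_last_number s i out) := by unfold Spec_take_last_number; infer_instance

-- ===== CLAIM (what is proved, stated in full; the proofs are below) =====
def Claim_equal_take_last_number : Prop := ∀ (s : String) (i : Int), Dom_take_last_number s i → Pre_take_last_number s i → Spec_take_last_number s i (take_last_number s i)

-- ===== LEMMAS AND PROOFS =====

theorem tln_char_eq_of_toNat {c : Char} {n : Nat} (d : Char) (hd : d.toNat = n) (h : c.toNat = n) : c = d := by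
  apply Char.ext
  apply UInt32.toNat_inj.mp
  show c.toNat = d.toNat
  rw [h, hd]

-- int(c) for a digit character c
theorem tln_ofChars_digit (c : Char) (h : '0' ≤ c ∧ c ≤ '9') :
    (PySem.Int.ofChars? [c]).getD 0 = (c.toNat : Int) - 48 := by
  obtain ⟨h1, h2⟩ := h
  have hl : 48 ≤ c.toNat := by simpa [Char.le_def, UInt32.le_iff_toNat_le] using h1
  have hr : c.toNat ≤ 57 := by simpa [Char.le_def, UInt32.le_iff_toNat_le] using h2
  interval_cases hc : c.toNat <;>
    first
    | (rw [tln_char_eq_of_toNat '0' rfl hc]; decide)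
    | (rw [tln_char_eq_of_toNat '1' rfl hc]; decide)
    | (rw [tln_char_eq_of_toNat '2' rfl hc]; decide)
    | (rw [tln_char_eq_of_toNat '3' rfl hc]; decide)
    | (rw [tln_char_eq_of_toNat '4' rfl hc]; decide)
    | (rw [tln_char_eq_of_toNat '5' rfl hc]; decide)
    | (rw [tln_char_eq_of_toNat '6' rfl hc]; decide)
    | (rw [tln_char_eq_of_toNat '7' rfl hc]; decide)
    | (rw [tln_char_eq_of_toNat '8' rfl hc]; decide)
    | (rw [tln_char_eq_of_toNat '9' rfl hc]; decide)

-- loop1 lands exactly where B's first scan lands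
theorem tlnLoop1_snd (cs : List Char) (c : Char) (i : Int) :
    (tlnLoop1 cs c i).2 = tlnSkipNonDigits cs i := by
  fun_induction tlnLoop1 cs c i with
  | case1 c i h c' hd => rw [tlnSkipNonDigits, dif_pos h, if_pos hd]
  | case2 c i h c' hd ih => rw [tlnSkipNonDigits, dif_pos h, if_neg hd]; exact ih
  | case3 c i h => rw [tlnSkipNonDigits, dif_neg h]

-- when loop1 stops at a nonnegative index, c is the digit found there
theorem tlnLoop1_fst (cs : List Char) (c : Char) (i : Int)
    (h : 0 ≤ (tlnLoop1 cs c i).2) :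
    (tlnLoop1 cs c i).1 = PySem.List.pyGetD cs (tlnLoop1 cs c i).2 '0' ∧
    '0' ≤ (tlnLoop1 cs c i).1 ∧ (tlnLoop1 cs c i).1 ≤ '9' := by
  fun_induction tlnLoop1 cs c i with
  | case1 c i hi c' hd => exact ⟨rfl, hd⟩
  | case2 c i hi c' hd ih => exact ih h
  | case3 c i hi => simp at h; omega

theorem tlnSkipNonDigits_le (cs : List Char) (i : Int) : tlnSkipNonDigits cs i ≤ i := by
  fun_induction tlnSkipNonDigits cs i with
  | case1 i h hd => exact le_refl i
  | case2 i h hd ih => omega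
  | case3 i h => exact le_refl i

theorem tlnSkipDigits_le (cs : List Char) (i : Int) : tlnSkipDigits cs i ≤ i := by
  fun_induction tlnSkipDigits cs i with
  | case1 i h hd ih => omega
  | case2 i h hd => exact le_refl i
  | case3 i h => exact le_refl i

theorem tlnSkipDigits_lb (cs : List Char) (i : Int) (h : -1 ≤ i) : -1 ≤ tlnSkipDigits cs i := by
  fun_induction tlnSkipDigits cs i with
  | case1 i hi hd ih => exact ih (by omega)
  | case2 i hi hd => omega
  | case3 i hi => omega

theorem tlnSkipDigits_step (cs : List Char) (i : Int) (hi : 0 ≤ i)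
    (hd : '0' ≤ PySem.List.pyGetD cs i '0' ∧ PySem.List.pyGetD cs i '0' ≤ '9') :
    tlnSkipDigits cs i = tlnSkipDigits cs (i - 1) := by
  rw [tlnSkipDigits, dif_pos hi, if_pos hd]

theorem tlnSkipDigits_stop (cs : List Char) (i : Int) (hi : 0 ≤ i)
    (hd : ¬('0' ≤ PySem.List.pyGetD cs i '0' ∧ PySem.List.pyGetD cs i '0' ≤ '9')) :
    tlnSkipDigits cs i = i := by
  rw [tlnSkipDigits, dif_pos hi, if_neg hd]
-- peel the last element off a slice
theorem tln_slice_snoc (cs : List Char) (j i : Int) (hj : -1 ≤ j) (hji : j < i)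
    (hlen : i < (cs.length : Int)) :
    PySem.List.slice cs (some (j + 1)) (some (i + 1)) =
      PySem.List.slice cs (some (j + 1)) (some i) ++ [PySem.List.pyGetD cs i '0'] := by
  have hi : 0 ≤ i := by omega
  rw [PySem.List.slice_toNat cs (by omega) (by omega), PySem.List.slice_toNat cs (by omega) hi,
    PySem.List.pyGetD_eq_getElem cs '0' hi hlen]
  have h1 : (i + 1).toNat - (j + 1).toNat = (i.toNat - (j + 1).toNat) + 1 := by omega
  rw [h1, List.take_add_one]
  congr 1
  have h2 : (cs.drop (j + 1).toNat)[i.toNat - (j + 1).toNat]? = cs[(j + 1).toNat + (i.toNat - (j + 1).toNat)]? :=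
    List.getElem?_drop
  have h3 : (j + 1).toNat + (i.toNat - (j + 1).toNat) = i.toNat := by omega
  rw [h2, h3, List.getElem?_eq_getElem (by omega)]
  rfl

-- the one-element slice at a digit position
theorem tln_slice_singleton (cs : List Char) (i : Int) (hi : 0 ≤ i) (hlen : i < (cs.length : Int)) :
    PySem.List.slice cs (some i) (some (i + 1)) = [PySem.List.pyGetD cs i '0'] := by
  have h := tln_slice_snoc cs (i - 1) i (by omega) (by omega) hlen
  have e1 : i - 1 + 1 = i := by omega
  rw [e1] at h
  rw [h, PySem.List.slice_toNat cs hi hi]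
  simp

-- main invariant: from a digit at i, loop2 computes n + k·(value of the run) and stops where B's second scan stops
theorem tlnLoop2_run (cs : List Char) (m : Nat) : ∀ (i : Int), i.toNat = m → 0 ≤ i → i < (cs.length : Int) →
    ('0' ≤ PySem.List.pyGetD cs i '0' ∧ PySem.List.pyGetD cs i '0' ≤ '9') →
    ∀ n k : Int, tlnLoop2 cs (PySem.List.pyGetD cs i '0') n k i =
      (n + k * (PySem.List.slice cs (some (tlnSkipDigits cs i + 1)) (some (i + 1))).foldl
        (fun n c => 10 * n + ((c.toNat : Int) - 48)) 0,
       tlnSkipDigits cs i) := by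
  induction m using Nat.strong_induction_on with
  | _ m ih =>
    intro i hm hi hlen hd n k
    rw [tlnLoop2, dif_pos hi]
    simp only [tln_ofChars_digit _ hd]
    by_cases h0 : i - 1 < 0
    · -- i = 0: the run is the single digit cs[0]
      rw [if_pos h0]
      have hj : tlnSkipDigits cs i = i - 1 := by
        rw [tlnSkipDigits_step cs i hi hd]
        have e2 : i - 1 = -1 := by omega
        rw [e2, tlnSkipDigits, dif_neg (by omega)]
      have e1 : i - 1 + 1 = i := by omega
      rw [hj, e1, tln_slice_singleton cs i hi hlen]
      simp only [List.foldl_cons, List.foldl_nil, Prod.mk.injEq]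
      exact ⟨by ring, trivial⟩
    · rw [if_neg h0]
      by_cases hd' : '0' ≤ PySem.List.pyGetD cs (i - 1) '0' ∧ PySem.List.pyGetD cs (i - 1) '0' ≤ '9'
      · -- another digit below: recurse
        rw [if_neg (not_or.mpr ⟨not_lt.mpr hd'.1, not_lt.mpr hd'.2⟩)]
        rw [ih (i - 1).toNat (by omega) (i - 1) rfl (by omega) (by omega) hd' _ _]
        have hstep : tlnSkipDigits cs i = tlnSkipDigits cs (i - 1) := tlnSkipDigits_step cs i hi hd
        have hjle : tlnSkipDigits cs (i - 1) ≤ i - 1 := tlnSkipDigits_le cs (i - 1)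
        have hjlb : -1 ≤ tlnSkipDigits cs (i - 1) := tlnSkipDigits_lb cs (i - 1) (by omega)
        rw [hstep, tln_slice_snoc cs (tlnSkipDigits cs (i - 1)) i (by omega) (by omega) hlen,
          List.foldl_append]
        have e1 : i - 1 + 1 = i := by omega
        rw [e1]
        simp only [List.foldl_cons, List.foldl_nil, Prod.mk.injEq]
        exact ⟨by ring, trivial⟩
      · -- non-digit below: stop
        rw [if_pos (by
          rcases not_and_or.mp hd' with ha | hb
          · exact Or.inl (not_le.mp ha)
          · exact Or.inr (not_le.mp hb))]
        have hj : tlnSkipDigits cs i = i - 1 := by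
          rw [tlnSkipDigits_step cs i hi hd, tlnSkipDigits_stop cs (i - 1) (by omega) hd']
        have e1 : i - 1 + 1 = i := by omega
        rw [hj, e1, tln_slice_singleton cs i hi hlen]
        simp only [List.foldl_cons, List.foldl_nil, Prod.mk.injEq]
        exact ⟨by ring, trivial⟩

-- ===== VERDICT (by name: the statement is the Claim_ definition above) =====
theorem take_last_number_spec : Claim_equal_take_last_number := by
  intro s i hdom hpre
  unfold Spec_take_last_number take_last_number take_last_number_alt
  rw [Pre_take_last_number] at hpre
  set cs := s.toList with hcs
  have hsnd := tlnLoop1_snd cs '0' i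
  by_cases hneg : (tlnLoop1 cs '0' i).2 < 0
  · rw [if_pos (by omega : tlnSkipNonDigits cs i < 0)]
    show tlnLoop2 cs (tlnLoop1 cs '0' i).1 0 1 (tlnLoop1 cs '0' i).2 = (0, tlnSkipNonDigits cs i)
    rw [tlnLoop2, dif_neg (by omega)]
    exact Prod.ext rfl (by rw [hsnd])
  · rw [if_neg (by omega : ¬ tlnSkipNonDigits cs i < 0)]
    show tlnLoop2 cs (tlnLoop1 cs '0' i).1 0 1 (tlnLoop1 cs '0' i).2 =
      (List.foldl (fun n c => 10 * n + ((c.toNat : Int) - 48)) 0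
        (PySem.List.slice cs (some (tlnSkipDigits cs (tlnSkipNonDigits cs i) + 1))
          (some (tlnSkipNonDigits cs i + 1))),
       tlnSkipDigits cs (tlnSkipNonDigits cs i))
    obtain ⟨hc, hdig⟩ := tlnLoop1_fst cs '0' i (by omega)
    have hi2 : 0 ≤ (tlnLoop1 cs '0' i).2 := by omega
    have hlen : (tlnLoop1 cs '0' i).2 < (cs.length : Int) := by
      have := tlnSkipNonDigits_le cs i
      omega
    rw [hc] at hdig
    have hrun := tlnLoop2_run cs ((tlnLoop1 cs '0' i).2).toNat ((tlnLoop1 cs '0' i).2) rfl hi2 hlen hdig 0 1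
    rw [hc, hrun, hsnd]
    simp only [Prod.mk.injEq]
    exact ⟨by ring, trivial⟩
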